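-- pv_equiv track=rewrite | github.com/pgmmpk/pypatgen | patgen/__init__.py | apply_pattern_set
-- ===== SOURCE A (Python) =====
-- EMPTYSET = frozenset()
--
-- def apply_pattern_set(patternset, word, maxchunk, margin_left=1, margin_right=1):
--     '''
--     Applies a single pattern set to the word
--
--     Result is the set of indices that patterset "suggested".
--     For hyphenation patternsets, these are indices where hyphenation is predicted.
--     For inhibiting patternsets, these are indices where hyphenation is inhibited.
--     '''
--     word = '.' + word + '.'
--
--     prediction = set()
--
--     for chunklen in range(1, maxchunk+1):
--         for start in range(0, len(word) - chunklen):
--             ch = word[start: start+chunklen]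
--             allowed = patternset.get(ch, EMPTYSET)
--             for index in allowed:
--                 if start + index > margin_left and start+index <= len(word) - 1 - margin_right:
--                     prediction.add(index + start - 1)  # -1 corrects for the added front padding
--
--     return prediction
-- ===== SOURCE B (Python) =====
-- def apply_pattern_set(patternset, word, maxchunk, margin_left=1, margin_right=1):
--     '''Alternative: index patterns by length once; for each chunk length, scan each
--     pattern of that length for its occurrences, then process the matches merged in
--     positional order (at most one pattern of a given length matches at a position).'''
--     word = '.' + word + '.'
--     n = len(word)
--
--     by_len = {}
--     for pat, indices in patternset.items():
--         by_len.setdefault(len(pat), []).append((pat, indices))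
--
--     prediction = set()
--     for chunklen in range(1, maxchunk + 1):
--         matches = []
--         for pat, indices in by_len.get(chunklen, []):
--             for start in range(0, n - chunklen):
--                 if word[start:start + chunklen] == pat:
--                     matches.append((start, indices))
--         for start, indices in sorted(matches, key=lambda m: m[0]):
--             for index in indices:
--                 if margin_left < start + index <= n - 1 - margin_right:
--                     prediction.add(index + start - 1)
--     return prediction
-- ===== Notes on version B (the rewrite author's own statement) =====
-- stated objective: alternative
-- what changed: B builds a length-indexed table of the patterns once, then for each chunk length scans the padded word for each pattern's occurrences and processes the merged matches in positional order, instead of slicing the word at every position and looking each chunk up in the pattern dict.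
import Mathlib
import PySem

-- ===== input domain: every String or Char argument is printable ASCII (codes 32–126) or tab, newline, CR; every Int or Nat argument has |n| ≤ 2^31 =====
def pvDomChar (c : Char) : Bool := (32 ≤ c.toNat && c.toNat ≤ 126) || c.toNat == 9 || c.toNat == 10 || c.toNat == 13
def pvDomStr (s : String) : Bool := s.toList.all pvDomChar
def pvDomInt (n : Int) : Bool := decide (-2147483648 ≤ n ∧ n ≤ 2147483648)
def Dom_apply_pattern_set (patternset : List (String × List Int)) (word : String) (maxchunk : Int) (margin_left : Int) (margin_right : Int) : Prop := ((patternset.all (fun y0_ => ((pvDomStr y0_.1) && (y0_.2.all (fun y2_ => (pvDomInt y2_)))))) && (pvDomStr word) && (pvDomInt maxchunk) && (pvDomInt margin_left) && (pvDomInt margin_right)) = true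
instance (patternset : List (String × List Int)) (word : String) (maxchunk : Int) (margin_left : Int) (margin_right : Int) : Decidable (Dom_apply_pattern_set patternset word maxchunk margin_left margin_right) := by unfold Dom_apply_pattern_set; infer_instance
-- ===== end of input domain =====

-- B re-implements A by a different decomposition (index the patterns by length once, scan per
-- pattern for its occurrences, merge the matches in positional order); objective: alternative,
-- same exact return value.

-- ===== PORT A =====
def apply_pattern_set (patternset : List (String × List Int)) (word : String) (maxchunk : Int) (margin_left : Int) (margin_right : Int) : List Int :=
  -- word = '.' + word + '.'   (String.mk is used because Lean's own String.append is opaque)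
  let w : String := String.mk ('.' :: word.toList ++ ['.'])
  (PySem.List.pyRange 1 (maxchunk + 1)).foldl (fun prediction chunklen =>
    (PySem.List.pyRange 0 (PySem.Str.len w - chunklen)).foldl (fun prediction start =>
      let ch := PySem.Str.slice w (some start) (some (start + chunklen))
      let allowed := (PySem.Dict.mk patternset).getD ch []
      allowed.foldl (fun prediction index =>
        if margin_left < start + index ∧ start + index ≤ PySem.Str.len w - 1 - margin_right then
          PySem.Set.add prediction (index + start - 1)
        else prediction) prediction) prediction) []

-- ===== PORT B =====
def apply_pattern_set_alt (patternset : List (String × List Int)) (word : String) (maxchunk : Int) (margin_left : Int) (margin_right : Int) : List Int :=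
  -- word = '.' + word + '.'
  let w : String := String.mk ('.' :: word.toList ++ ['.'])
  let n : Int := PySem.Str.len w
  -- by_len.setdefault(len(pat), []).append((pat, indices))  ==  by_len[len(pat)] = by_len.get(len(pat), []) + [(pat, indices)]
  let by_len : PySem.Dict Int (List (String × List Int)) :=
    patternset.foldl (fun d p => d.modify (PySem.Str.len p.1) [] (fun l => l ++ [p])) (PySem.Dict.mk [])
  (PySem.List.pyRange 1 (maxchunk + 1)).foldl (fun prediction chunklen =>
    let matches_ : List (Int × List Int) :=
      (by_len.getD chunklen []).foldl (fun ms p =>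
        (PySem.List.pyRange 0 (n - chunklen)).foldl (fun ms start =>
          if PySem.Str.slice w (some start) (some (start + chunklen)) == p.1 then
            ms ++ [(start, p.2)]
          else ms) ms) []
    (PySem.List.sorted matches_ (fun m => m.1)).foldl (fun prediction m =>
      m.2.foldl (fun prediction index =>
        if margin_left < m.1 + index ∧ m.1 + index ≤ n - 1 - margin_right then
          PySem.Set.add prediction (index + m.1 - 1)
        else prediction) prediction) prediction) []

-- ===== PRECONDITION & SPEC =====
-- Pre_ excludes association lists with duplicate keys: a Python dict cannot contain them, and on
-- such lists A's dict lookup uses only the first binding while B consults every entry.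
def Pre_apply_pattern_set (patternset : List (String × List Int)) (word : String) (maxchunk : Int) (margin_left : Int) (margin_right : Int) : Prop :=
  (patternset.map Prod.fst).Nodup
instance (patternset : List (String × List Int)) (word : String) (maxchunk : Int) (margin_left : Int) (margin_right : Int) : Decidable (Pre_apply_pattern_set patternset word maxchunk margin_left margin_right) := by unfold Pre_apply_pattern_set; infer_instance

def pvWitness_apply_pattern_set : (List (String × List Int)) × String × Int × Int × Int :=
  ([("a", [1]), ("ba", [0, 2])], "abab", 3, 1, 1)

def Spec_apply_pattern_set (patternset : List (String × List Int)) (word : String) (maxchunk : Int) (margin_left : Int) (margin_right : Int) (out : List Int) : Prop := out = apply_pattern_set_alt patternset word maxchunk margin_left margin_right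
instance (patternset : List (String × List Int)) (word : String) (maxchunk : Int) (margin_left : Int) (margin_right : Int) (out : List Int) : Decidable (Spec_apply_pattern_set patternset word maxchunk margin_left margin_right out) := by unfold Spec_apply_pattern_set; infer_instance

-- ===== CLAIM (what is proved, stated in full; the proofs are below) =====
def Claim_equal_apply_pattern_set : Prop := ∀ (patternset : List (String × List Int)) (word : String) (maxchunk : Int) (margin_left : Int) (margin_right : Int), Dom_apply_pattern_set patternset word maxchunk margin_left margin_right → Pre_apply_pattern_set patternset word maxchunk margin_left margin_right → Spec_apply_pattern_set patternset word maxchunk margin_left margin_right (apply_pattern_set patternset word maxchunk margin_left margin_right)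

-- ===== LEMMAS AND PROOFS =====

-- The match at position s with chunk length c, as both programs look at it.
def pvCh (w : String) (s c : Int) : String := PySem.Str.slice w (some s) (some (s + c))

-- A's view of one chunk length: positions in scan order, keeping only those whose chunk is a key.
def pvCanon (ps : List (String × List Int)) (w : String) (c : Int) : List (Int × List Int) :=
  (PySem.List.pyRange 0 (PySem.Str.len w - c)).filterMap
    (fun s => ((PySem.Dict.mk ps).get? (pvCh w s c)).map (fun v => (s, v)))

-- B's view of one chunk length: per-pattern occurrence lists, concatenated.
def pvMatches (ps : List (String × List Int)) (w : String) (c : Int) : List (Int × List Int) :=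
  (ps.filter (fun p => PySem.Str.len p.1 == c)).flatMap
    (fun p => ((PySem.List.pyRange 0 (PySem.Str.len w - c)).filter
      (fun s => PySem.Str.slice w (some s) (some (s + c)) == p.1)).map (fun s => (s, p.2)))

-- The common per-match update of the prediction set.
def pvInner (ml mr n : Int) (prediction : List Int) (m : Int × List Int) : List Int :=
  m.2.foldl (fun prediction index =>
    if ml < m.1 + index ∧ m.1 + index ≤ n - 1 - mr then
      PySem.Set.add prediction (index + m.1 - 1)
    else prediction) prediction

lemma pv_keys_nodup (ps : List (String × List Int)) (hnd : (ps.map Prod.fst).Nodup) :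
    (PySem.Dict.mk ps).keys.Nodup := by
  have h : (PySem.Dict.mk ps).keys = ps.map Prod.fst := by simp [PySem.Dict.keys]
  rw [h]; exact hnd

lemma pv_get?_iff (ps : List (String × List Int)) (hnd : (ps.map Prod.fst).Nodup)
    (k : String) (v : List Int) : (PySem.Dict.mk ps).get? k = some v ↔ (k, v) ∈ ps := by
  simpa using PySem.Dict.get?_eq_some_iff_mem_items (PySem.Dict.mk ps) k v (pv_keys_nodup ps hnd)

lemma pv_len_slice (w : String) (s c : Int) (h0 : 0 ≤ s) (h1 : 0 ≤ c)
    (h2 : s + c ≤ PySem.Str.len w) :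
    PySem.Str.len (PySem.Str.slice w (some s) (some (s + c))) = c := by
  rw [PySem.Str.len_eq] at h2 ⊢
  rw [PySem.Str.toList_slice, PySem.Chars.slice_eq_listSlice, PySem.List.slice_toNat _ h0 (by omega)]
  simp only [List.length_take, List.length_drop]
  omega

lemma pv_Aside (ps : List (String × List Int)) (w : String) (ml mr c : Int) (pred : List Int) :
    (PySem.List.pyRange 0 (PySem.Str.len w - c)).foldl (fun prediction start =>
        ((PySem.Dict.mk ps).getD (PySem.Str.slice w (some start) (some (start + c))) []).foldl
          (fun prediction index =>
            if ml < start + index ∧ start + index ≤ PySem.Str.len w - 1 - mr then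
              PySem.Set.add prediction (index + start - 1)
            else prediction) prediction) pred
    = (pvCanon ps w c).foldl (pvInner ml mr (PySem.Str.len w)) pred := by
  unfold pvCanon
  rw [List.foldl_filterMap]
  apply PySem.List.foldl_congr_mem
  intro acc s _
  rcases h : (PySem.Dict.mk ps).get? (PySem.Str.slice w (some s) (some (s + c))) with _ | v
  · simp [pvCh, PySem.Dict.getD_eq_get?_getD, h]
  · simp [pvCh, PySem.Dict.getD_eq_get?_getD, h, pvInner]

lemma pv_byLen (ps : List (String × List Int)) (c : Int)
    (d : PySem.Dict Int (List (String × List Int))) :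
    (ps.foldl (fun d p => d.modify (PySem.Str.len p.1) [] (fun l => l ++ [p])) d).getD c []
    = d.getD c [] ++ ps.filter (fun p => PySem.Str.len p.1 == c) := by
  induction ps generalizing d with
  | nil => simp
  | cons p t ih =>
    simp only [List.foldl_cons, List.filter_cons]
    rw [ih]
    by_cases h : PySem.Str.len p.1 = c
    · subst h
      rw [PySem.Dict.getD_modify_self]
      have hb : (PySem.Str.len p.1 == PySem.Str.len p.1) = true := by simp
      rw [hb]
      simp [List.append_assoc]
    · have hb : (PySem.Str.len p.1 == c) = false := by simpa using h
      rw [PySem.Dict.getD_modify_of_ne, hb]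
      · simp
      · exact fun hc => h hc.symm

lemma pv_occfold (w : String) (c : Int) (l : List (String × List Int))
    (acc : List (Int × List Int)) :
    l.foldl (fun ms p =>
      (PySem.List.pyRange 0 (PySem.Str.len w - c)).foldl (fun ms start =>
        if PySem.Str.slice w (some start) (some (start + c)) == p.1 then
          ms ++ [(start, p.2)]
        else ms) ms) acc
    = acc ++ l.flatMap (fun p => ((PySem.List.pyRange 0 (PySem.Str.len w - c)).filter
        (fun s => PySem.Str.slice w (some s) (some (s + c)) == p.1)).map (fun s => (s, p.2))) := by
  rw [← PySem.List.foldl_append_eq_flatMap]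
  apply PySem.List.foldl_congr_mem
  intro ms p _
  exact PySem.List.foldl_append_if _ _ _ _

lemma pv_B_to_matches (ps : List (String × List Int)) (w : String) (c : Int) :
    ((ps.foldl (fun d p => d.modify (PySem.Str.len p.1) [] (fun l => l ++ [p]))
        (PySem.Dict.mk [])).getD c []).foldl (fun ms p =>
      (PySem.List.pyRange 0 (PySem.Str.len w - c)).foldl (fun ms start =>
        if PySem.Str.slice w (some start) (some (start + c)) == p.1 then
          ms ++ [(start, p.2)]
        else ms) ms) ([] : List (Int × List Int))
    = pvMatches ps w c := by
  rw [pv_byLen]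
  have h0 : (PySem.Dict.mk ([] : List (Int × List (String × List Int)))).getD c [] = [] := rfl
  rw [h0, List.nil_append, pv_occfold, List.nil_append]
  rfl

lemma pv_mem_canon (ps : List (String × List Int)) (w : String) (c : Int) (s : Int)
    (v : List Int) :
    (s, v) ∈ pvCanon ps w c ↔
      (0 ≤ s ∧ s < PySem.Str.len w - c) ∧ (PySem.Dict.mk ps).get? (pvCh w s c) = some v := by
  unfold pvCanon
  rw [List.mem_filterMap]
  constructor
  · rintro ⟨a, ha, hmap⟩
    rw [Option.map_eq_some_iff] at hmap
    obtain ⟨v', hg, hpair⟩ := hmap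
    injection hpair with e1 e2
    subst e1; subst e2
    exact ⟨PySem.List.mem_pyRange_one.mp ha, hg⟩
  · rintro ⟨⟨h0, h1⟩, hg⟩
    exact ⟨s, PySem.List.mem_pyRange_one.mpr ⟨h0, h1⟩, by rw [hg]; rfl⟩

lemma pv_mem_matches (ps : List (String × List Int)) (w : String) (c : Int) (s : Int)
    (v : List Int) :
    (s, v) ∈ pvMatches ps w c ↔
      ∃ p ∈ ps, PySem.Str.len p.1 = c ∧ (0 ≤ s ∧ s < PySem.Str.len w - c) ∧
        pvCh w s c = p.1 ∧ v = p.2 := by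
  unfold pvMatches pvCh
  simp only [List.mem_flatMap, List.mem_filter, List.mem_map, PySem.List.mem_pyRange_one,
    beq_iff_eq]
  constructor
  · rintro ⟨p, ⟨hp, hlen⟩, a, ⟨⟨h0, h1⟩, hsl⟩, hpair⟩
    injection hpair with e1 e2
    subst e1
    exact ⟨p, hp, hlen, ⟨h0, h1⟩, hsl, e2.symm⟩
  · rintro ⟨p, hp, hlen, ⟨h0, h1⟩, hsl, rfl⟩
    exact ⟨p, ⟨hp, hlen⟩, s, ⟨⟨h0, h1⟩, hsl⟩, rfl⟩

lemma pv_pairwise_canon (ps : List (String × List Int)) (w : String) (c : Int) :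
    (pvCanon ps w c).Pairwise (fun a b => a.1 < b.1) := by
  unfold pvCanon
  rw [List.pairwise_filterMap]
  refine (PySem.List.pairwise_lt_pyRange_one 0 _).imp ?_
  intro a a' hlt b hb b' hb'
  rw [Option.map_eq_some_iff] at hb hb'
  obtain ⟨v, _, rfl⟩ := hb
  obtain ⟨v', _, rfl⟩ := hb'
  exact hlt

lemma pv_nodup_canon (ps : List (String × List Int)) (w : String) (c : Int) :
    (pvCanon ps w c).Nodup := by
  refine (pv_pairwise_canon ps w c).imp ?_
  intro a b h heq
  rw [heq] at h
  exact lt_irrefl _ h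

lemma pv_nodup_matches (ps : List (String × List Int)) (w : String) (c : Int)
    (hnd : (ps.map Prod.fst).Nodup) : (pvMatches ps w c).Nodup := by
  unfold pvMatches
  rw [List.nodup_flatMap]
  constructor
  · intro p _
    refine List.Nodup.map ?_ ((PySem.List.nodup_pyRange_one 0 _).filter _)
    intro a b hab
    simpa using congrArg Prod.fst hab
  · have hpw : ps.Pairwise (fun p q => p.1 ≠ q.1) := List.pairwise_map.mp hnd
    refine (hpw.filter _).imp ?_
    intro p q hne x hxp hxq
    obtain ⟨a, ha, hxa⟩ := List.mem_map.mp hxp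
    obtain ⟨b, hb, hxb⟩ := List.mem_map.mp hxq
    have e : (a, p.2) = (b, q.2) := hxa.trans hxb.symm
    injection e with e1 _
    subst e1
    have h1 : PySem.Str.slice w (some a) (some (a + c)) == p.1 := (List.mem_filter.mp ha).2
    have h2 : PySem.Str.slice w (some a) (some (a + c)) == q.1 := (List.mem_filter.mp hb).2
    exact hne ((eq_of_beq h1).symm.trans (eq_of_beq h2))

lemma pv_canon_iff (ps : List (String × List Int)) (w : String) (c : Int)
    (hnd : (ps.map Prod.fst).Nodup) (hc : 1 ≤ c) :
    ∀ x, x ∈ pvCanon ps w c ↔ x ∈ pvMatches ps w c := by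
  rintro ⟨s, v⟩
  rw [pv_mem_canon, pv_mem_matches]
  constructor
  · rintro ⟨⟨h0, h1⟩, hg⟩
    refine ⟨(pvCh w s c, v), (pv_get?_iff ps hnd _ _).mp hg, ?_, ⟨h0, h1⟩, rfl, rfl⟩
    exact pv_len_slice w s c h0 (by omega) (by omega)
  · rintro ⟨p, hp, _, ⟨h0, h1⟩, hsl, rfl⟩
    exact ⟨⟨h0, h1⟩, by rw [hsl]; exact (pv_get?_iff ps hnd _ _).mpr hp⟩

lemma pv_sorted_canon (ps : List (String × List Int)) (w : String) (c : Int)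
    (hnd : (ps.map Prod.fst).Nodup) (hc : 1 ≤ c) :
    PySem.List.sorted (pvMatches ps w c) (fun m => m.1) = pvCanon ps w c :=
  PySem.List.sorted_eq_of_perm_of_pairwise_lt _ _ _
    ((List.perm_ext_iff_of_nodup (pv_nodup_canon ps w c)
      (pv_nodup_matches ps w c hnd)).mpr (pv_canon_iff ps w c hnd hc))
    (pv_pairwise_canon ps w c)

-- ===== VERDICT (by name: the statement is the Claim_ definition above) =====
theorem apply_pattern_set_spec : Claim_equal_apply_pattern_set := by
  intro ps word mc ml mr _hdom hpre
  unfold Spec_apply_pattern_set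
  simp only [apply_pattern_set, apply_pattern_set_alt]
  apply PySem.List.foldl_congr_mem
  intro pred c hc
  rw [pv_B_to_matches, pv_sorted_canon ps _ c hpre (PySem.List.mem_pyRange_one.mp hc).1]
  exact pv_Aside ps _ ml mr c pred
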